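-- pv_equiv track=rewrite | github.com/EranOfek/AstroPack | python/utils/matlab_utils/get_matlab_functions.py | replace_repch
-- ===== SOURCE A (Python) =====
-- def replace_repch(s, ch_list, min_count, newch):
--     if not type(ch_list) is list:
--         ch_list = [ch_list]
--
--     for ch in ch_list:
--         found = False
--         count = 0
--         for c in s:
--             if c == ch:
--                 count += 1
--                 if count >= min_count:
--                     #s = s.replace(min_count * ch, newch)
--                     s = ''
--                     return s
--             else:
--                 count = 0
--
--     return s
--
--     '''
--     count = 0
--     r = ''
--     for c in s:
--         if c == ch:
--             count += 1
--         else: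
--             if count >= min_count:
--             else:
--             count = 0
--
--     return r
--     '''
-- ===== SOURCE B (Python) =====
-- def replace_repch(s, ch_list, min_count, newch):
--     # Single run-length pass over s with a set of targets,
--     # instead of A's one full scan of s per entry of ch_list.
--     if not type(ch_list) is list:
--         ch_list = [ch_list]
--     targets = set(ch_list)
--     prev = None
--     run = 0
--     for c in s:
--         if c == prev:
--             run += 1
--         else:
--             prev = c
--             run = 1
--         if run >= min_count and c in targets:
--             return ''
--     return s
-- ===== Notes on version B (the rewrite author's own statement) =====
-- stated objective: alternative
-- what changed: Replaces A's per-entry-of-ch_list full rescan of s with a single run-length pass over s checking membership in a set of targets.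
import Mathlib
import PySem

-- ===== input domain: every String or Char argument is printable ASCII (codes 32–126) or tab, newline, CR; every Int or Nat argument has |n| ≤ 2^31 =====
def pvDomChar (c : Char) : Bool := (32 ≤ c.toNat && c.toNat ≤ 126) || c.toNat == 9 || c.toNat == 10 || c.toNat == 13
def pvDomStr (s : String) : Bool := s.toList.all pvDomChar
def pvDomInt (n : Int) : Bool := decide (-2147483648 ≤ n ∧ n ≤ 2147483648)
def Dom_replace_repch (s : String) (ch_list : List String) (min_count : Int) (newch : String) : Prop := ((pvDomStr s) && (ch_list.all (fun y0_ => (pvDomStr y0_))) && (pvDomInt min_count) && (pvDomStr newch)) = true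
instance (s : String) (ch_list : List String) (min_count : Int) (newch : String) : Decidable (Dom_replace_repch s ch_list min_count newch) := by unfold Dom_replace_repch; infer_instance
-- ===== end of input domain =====

-- B replaces A's per-ch_list-entry rescan of s with one run-length pass over s and a set of targets; proved to return the same string.


-- ===== PORT A =====
-- inner 'for c in s' loop of A, carrying the running count of consecutive matches
def scanA (ch : String) (min_count : Int) : List Char → Int → Bool
  | [], _ => false
  | c :: rest, count =>
    if String.ofList [c] = ch then
      if min_count ≤ count + 1 then true else scanA ch min_count rest (count + 1)
    else scanA ch min_count rest 0

-- outer 'for ch in ch_list' loop of A: first ch that triggers returns ''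
def loopA (s : String) (min_count : Int) : List String → String
  | [] => s
  | ch :: rest => if scanA ch min_count s.toList 0 then "" else loopA s min_count rest

-- the 'type(ch_list) is list' wrap is the identity here: ch_list is always a list
def replace_repch (s : String) (ch_list : List String) (min_count : Int) (_newch : String) : String :=
  loopA s min_count ch_list

-- ===== PORT B =====
-- B's single 'for c in s' loop, tracking prev char and current run length
def scanB (tg : PySem.Set String) (min_count : Int) : List Char → Option Char → Int → Bool
  | [], _, _ => false
  | c :: rest, prev, run =>
    let run' := if some c = prev then run + 1 else 1
    if min_count ≤ run' ∧ (String.ofList [c]) ∈ tg then true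
    else scanB tg min_count rest (some c) run'

def replace_repch_alt (s : String) (ch_list : List String) (min_count : Int) (_newch : String) : String :=
  let targets := PySem.Set.ofList ch_list
  if scanB targets min_count s.toList none 0 then "" else s

-- ===== PRECONDITION & SPEC =====
def Spec_replace_repch (s : String) (ch_list : List String) (min_count : Int) (newch : String) (out : String) : Prop := out = replace_repch_alt s ch_list min_count newch
instance (s : String) (ch_list : List String) (min_count : Int) (newch : String) (out : String) : Decidable (Spec_replace_repch s ch_list min_count newch out) := by unfold Spec_replace_repch; infer_instance

-- ===== CLAIM (what is proved, stated in full; the proofs are below) =====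
def Claim_equal_replace_repch : Prop := ∀ (s : String) (ch_list : List String) (min_count : Int) (newch : String), Dom_replace_repch s ch_list min_count newch → Spec_replace_repch s ch_list min_count newch (replace_repch s ch_list min_count newch)

-- ===== LEMMAS AND PROOFS =====

-- A's outer loop returns '' iff some ch triggers its inner scan
theorem loopA_eq (s : String) (mc : Int) (L : List String) :
    loopA s mc L = if L.any (fun ch => scanA ch mc s.toList 0) then "" else s := by
  induction L with
  | nil => simp [loopA]
  | cons ch rest ih =>
    simp only [loopA, List.any_cons, ih]
    by_cases h : scanA ch mc s.toList 0 = true <;> simp [h]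

-- singleton strings are equal only for equal chars
theorem ofList_singleton_inj {d c : Char} (h : String.ofList [d] = String.ofList [c]) : d = c := by
  have := congrArg String.toList h
  simp at this; exact this

-- after a char differing from ch's char (or at the end), A's count is as good as reset
theorem scanA_reset (ch : String) (mc : Int) (rest : List Char) (c : Char)
    (hne : String.ofList [c] = ch) (hh : ∀ d, rest.head? = some d → d ≠ c) (k : Int) :
    scanA ch mc rest k = scanA ch mc rest 0 := by
  cases rest with
  | nil => rfl
  | cons d t =>
    have hdc : d ≠ c := hh d rfl
    have hm : ¬ String.ofList [d] = ch := fun h =>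
      hdc (ofList_singleton_inj (h.trans hne.symm))
    simp [scanA, hm]

-- A's scan over a maximal run of c, when c matches ch
theorem scanA_run_match (ch : String) (mc : Int) (c : Char) (hne : String.ofList [c] = ch)
    (l : Nat) (hl : 1 ≤ l) (rest : List Char) (hh : ∀ d, rest.head? = some d → d ≠ c) :
    ∀ k : Int, scanA ch mc (List.replicate l c ++ rest) k
      = (decide (mc ≤ k + l) || scanA ch mc rest 0) := by
  induction l with
  | zero => omega
  | succ l ih =>
    intro k
    have hstep : scanA ch mc (List.replicate (l + 1) c ++ rest) k
        = if mc ≤ k + 1 then true else scanA ch mc (List.replicate l c ++ rest) (k + 1) := by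
      simp [List.replicate_succ, scanA, hne]
    by_cases h1 : mc ≤ k + 1
    · rw [hstep, if_pos h1]
      rw [decide_eq_true (show mc ≤ k + ((l + 1 : Nat) : Int) by push_cast; omega), Bool.true_or]
    · rw [hstep, if_neg h1]
      by_cases hl0 : l = 0
      · subst hl0
        simp only [List.replicate, List.nil_append]
        rw [scanA_reset ch mc rest c hne hh]
        rw [decide_eq_false (show ¬ mc ≤ k + ((0 + 1 : Nat) : Int) by push_cast at *; omega), Bool.false_or]
      · rw [ih (by omega) (k + 1)]
        congr 1
        simp only [decide_eq_decide]
        push_cast; omega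

-- A's scan over a run of c, when c does not match ch: the count just resets
theorem scanA_run_nomatch (ch : String) (mc : Int) (c : Char) (hne : ¬ String.ofList [c] = ch)
    (l : Nat) (hl : 1 ≤ l) (rest : List Char) :
    ∀ k : Int, scanA ch mc (List.replicate l c ++ rest) k = scanA ch mc rest 0 := by
  induction l with
  | zero => omega
  | succ l ih =>
    intro k
    simp only [List.replicate_succ, List.cons_append, scanA, if_neg hne]
    by_cases hl0 : l = 0
    · subst hl0; simp
    · exact ih (by omega) 0

-- B: a char differing from the pending run resets the state as if fresh
theorem scanB_reset (tg : PySem.Set String) (mc : Int) (rest : List Char) (c : Char)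
    (hh : ∀ d, rest.head? = some d → d ≠ c) (r : Int) :
    scanB tg mc rest (some c) r = scanB tg mc rest none 0 := by
  cases rest with
  | nil => rfl
  | cons d t =>
    have hdc : d ≠ c := hh d rfl
    simp [scanB, show ¬ (some d = some c) from by simpa using hdc]

-- B's scan over a maximal run of c, entered with prev = c and run = r
theorem scanB_run (tg : PySem.Set String) (mc : Int) (c : Char)
    (l : Nat) (hl : 1 ≤ l) (rest : List Char) (hh : ∀ d, rest.head? = some d → d ≠ c) :
    ∀ r : Int, scanB tg mc (List.replicate l c ++ rest) (some c) r
      = ((decide (String.ofList [c] ∈ tg) && decide (mc ≤ r + l)) || scanB tg mc rest none 0) := by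
  induction l with
  | zero => omega
  | succ l ih =>
    intro r
    have hstep : scanB tg mc (List.replicate (l + 1) c ++ rest) (some c) r
        = if mc ≤ r + 1 ∧ String.ofList [c] ∈ tg then true
          else scanB tg mc (List.replicate l c ++ rest) (some c) (r + 1) := by
      simp [List.replicate_succ, scanB]
    by_cases hmem : String.ofList [c] ∈ tg
    · by_cases h1 : mc ≤ r + 1
      · rw [hstep, if_pos ⟨h1, hmem⟩]
        rw [decide_eq_true hmem, decide_eq_true (show mc ≤ r + ((l + 1 : Nat) : Int) by push_cast; omega), Bool.true_and, Bool.true_or]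
      · rw [hstep, if_neg (by tauto)]
        by_cases hl0 : l = 0
        · subst hl0
          simp only [List.replicate, List.nil_append]
          rw [scanB_reset tg mc rest c hh]
          rw [decide_eq_false (show ¬ mc ≤ r + ((0 + 1 : Nat) : Int) by push_cast at *; omega), Bool.and_false, Bool.false_or]
        · rw [ih (by omega) (r + 1)]
          congr 2
          simp only [decide_eq_decide]
          push_cast; omega
    · rw [hstep, if_neg (by tauto)]
      by_cases hl0 : l = 0
      · subst hl0
        simp only [List.replicate, List.nil_append]
        rw [scanB_reset tg mc rest c hh]
        simp [hmem]
      · rw [ih (by omega) (r + 1)]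
        simp [hmem]

-- entering B's scan fresh at the start of a maximal run
theorem scanB_run_fresh (tg : PySem.Set String) (mc : Int) (c : Char)
    (l : Nat) (hl : 1 ≤ l) (rest : List Char) (hh : ∀ d, rest.head? = some d → d ≠ c)
    (prev : Option Char) (hprev : prev ≠ some c) (r : Int) :
    scanB tg mc (List.replicate l c ++ rest) prev r
      = ((decide (String.ofList [c] ∈ tg) && decide (mc ≤ (l : Int))) || scanB tg mc rest none 0) := by
  cases l with
  | zero => omega
  | succ l =>
    have hcond : (if some c = prev then r + 1 else (1 : Int)) = 1 :=
      if_neg (fun h => hprev h.symm)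
    have hstep : scanB tg mc (List.replicate (l + 1) c ++ rest) prev r
        = if mc ≤ 1 ∧ String.ofList [c] ∈ tg then true
          else scanB tg mc (List.replicate l c ++ rest) (some c) 1 := by
      simp [List.replicate_succ, scanB, hcond]
    by_cases hmem : String.ofList [c] ∈ tg
    · by_cases h1 : mc ≤ (1 : Int)
      · rw [hstep, if_pos ⟨h1, hmem⟩]
        rw [decide_eq_true hmem, decide_eq_true (show mc ≤ ((l + 1 : Nat) : Int) by push_cast; omega), Bool.true_and, Bool.true_or]
      · rw [hstep, if_neg (by tauto)]
        by_cases hl0 : l = 0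
        · subst hl0
          simp only [List.replicate, List.nil_append]
          rw [scanB_reset tg mc rest c hh]
          rw [decide_eq_false (show ¬ mc ≤ ((0 + 1 : Nat) : Int) by push_cast at *; omega), Bool.and_false, Bool.false_or]
        · rw [scanB_run tg mc c l (by omega) rest hh 1]
          congr 2
          simp only [decide_eq_decide]
          push_cast; omega
    · rw [hstep, if_neg (by tauto)]
      by_cases hl0 : l = 0
      · subst hl0
        simp only [List.replicate, List.nil_append]
        rw [scanB_reset tg mc rest c hh]
        simp [hmem]
      · rw [scanB_run tg mc c l (by omega) rest hh 1]
        simp [hmem]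

-- any over a pointwise disjunction splits
theorem any_or (L : List String) (f g : String → Bool) :
    L.any (fun x => f x || g x) = (L.any f || L.any g) := by
  induction L with
  | nil => rfl
  | cons a t ih => cases hf : f a <;> cases hg : g a <;> simp [List.any_cons, hf, hg, ih]

-- any over an equality test against v, conjoined with a constant b
theorem any_eq_mem (L : List String) (v : String) (b : Bool) :
    L.any (fun ch => decide (v = ch) && b) = (decide (v ∈ L) && b) := by
  induction L with
  | nil => simp
  | cons a t ih =>
    by_cases h : v = a <;> simp [List.any_cons, h, ih]

-- takeWhile (· == c) is a replicate of c
theorem takeWhile_beq_replicate (c : Char) (t : List Char) :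
    t.takeWhile (fun x => x == c) = List.replicate (t.takeWhile (fun x => x == c)).length c := by
  induction t with
  | nil => rfl
  | cons a t ih =>
    by_cases h : a = c
    · subst h; simpa [List.replicate] using ih
    · simp [h]

-- the head of dropWhile (· == c) is not c
theorem head_dropWhile_ne (c : Char) (t : List Char) :
    ∀ d, (t.dropWhile (fun x => x == c)).head? = some d → d ≠ c := by
  induction t with
  | nil => intro d h; simp at h
  | cons a t ih =>
    intro d h
    by_cases ha : a = c
    · subst ha; rw [List.dropWhile_cons_of_pos (by simp)] at h; exact ih d h
    · rw [List.dropWhile_cons_of_neg (by simp [ha])] at h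
      simp at h; subst h; exact ha

-- MAIN BRIDGE: A's any-of-scans equals B's single scan, by strong induction on the length of cs
theorem main_bridge (L : List String) (mc : Int) :
    ∀ n (cs : List Char), cs.length ≤ n →
      L.any (fun ch => scanA ch mc cs 0) = scanB (PySem.Set.ofList L) mc cs none 0 := by
  intro n
  induction n with
  | zero =>
    intro cs h
    have : cs = [] := List.eq_nil_of_length_eq_zero (by omega)
    subst this
    simp [scanA, scanB]
  | succ n ih =>
    intro cs hlen
    cases cs with
    | nil => simp [scanA, scanB]
    | cons c t =>
      set l : Nat := (t.takeWhile (fun x => x == c)).length + 1 with hl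
      set rest : List Char := t.dropWhile (fun x => x == c) with hrest
      have hdec : c :: t = List.replicate l c ++ rest := by
        have htd := List.takeWhile_append_dropWhile (p := fun x => x == c) (l := t)
        calc c :: t = c :: (t.takeWhile (fun x => x == c) ++ t.dropWhile (fun x => x == c)) := by
              rw [htd]
          _ = List.replicate l c ++ rest := by
              rw [hl, hrest, List.replicate, ← List.cons_append]
              congr 1
              exact congrArg (c :: ·) (takeWhile_beq_replicate c t)
      have hh : ∀ d, rest.head? = some d → d ≠ c := head_dropWhile_ne c t
      have hrlen : rest.length ≤ n := by
        have := congrArg List.length hdec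
        simp at this
        simp at hlen
        omega
      rw [hdec]
      have hA : ∀ ch, scanA ch mc (List.replicate l c ++ rest) 0
          = ((decide (String.ofList [c] = ch) && decide (mc ≤ (l : Int))) || scanA ch mc rest 0) := by
        intro ch
        by_cases hm : String.ofList [c] = ch
        · rw [scanA_run_match ch mc c hm l (by omega) rest hh 0]
          simp [hm]
        · rw [scanA_run_nomatch ch mc c hm l (by omega) rest]
          simp [hm]
      calc L.any (fun ch => scanA ch mc (List.replicate l c ++ rest) 0)
          = L.any (fun ch => (decide (String.ofList [c] = ch) && decide (mc ≤ (l : Int))) || scanA ch mc rest 0) := by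
            simp only [hA]
        _ = (L.any (fun ch => decide (String.ofList [c] = ch) && decide (mc ≤ (l : Int))) || L.any (fun ch => scanA ch mc rest 0)) :=
            any_or L _ _
        _ = ((decide (String.ofList [c] ∈ L) && decide (mc ≤ (l : Int))) || scanB (PySem.Set.ofList L) mc rest none 0) := by
            rw [any_eq_mem, ih rest hrlen]
        _ = scanB (PySem.Set.ofList L) mc (List.replicate l c ++ rest) none 0 := by
            rw [scanB_run_fresh (PySem.Set.ofList L) mc c l (by omega) rest hh none (by simp) 0]
            simp [PySem.Set.mem_ofList]

-- ===== VERDICT (by name: the statement is the Claim_ definition above) =====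
theorem replace_repch_spec : Claim_equal_replace_repch := by
  intro s ch_list mc newch _
  unfold Spec_replace_repch replace_repch replace_repch_alt
  rw [loopA_eq, main_bridge ch_list mc s.toList.length s.toList le_rfl]
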